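-- pv_equiv track=rewrite | github.com/HoangAce/ExerciseCodeforcer | 1498A.py | gcdSum
-- ===== SOURCE A (Python) =====
-- def gcdSum(x):
--     y = 0
--     for char in str(x):
--         y += int(char)
--     while y > 0:
--         temp = x
--         x = y
--         y = temp % y
--     return x
-- ===== SOURCE B (Python) =====
-- def _gcd(a, b):
--     return a if b == 0 else _gcd(b, a % b)
--
--
-- def gcdSum(x):
--     y = sum(int(c) for c in str(x))
--     return _gcd(x, y)
-- ===== Notes on version B (the rewrite author's own statement) =====
-- stated objective: simpler
-- what changed: B computes the digit sum as a sum over str(x) and replaces A's in-place temp-swap while-loop with a recursive Euclidean gcd helper.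
import Mathlib
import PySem

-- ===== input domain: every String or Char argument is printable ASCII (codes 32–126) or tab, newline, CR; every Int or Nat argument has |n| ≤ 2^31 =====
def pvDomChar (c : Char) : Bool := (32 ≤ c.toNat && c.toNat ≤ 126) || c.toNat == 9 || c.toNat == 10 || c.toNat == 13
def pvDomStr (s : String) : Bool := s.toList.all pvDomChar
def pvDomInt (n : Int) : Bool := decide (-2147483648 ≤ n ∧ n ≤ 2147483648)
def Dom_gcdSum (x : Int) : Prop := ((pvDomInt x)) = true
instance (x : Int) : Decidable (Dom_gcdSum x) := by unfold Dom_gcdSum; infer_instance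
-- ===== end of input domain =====

-- B replaces A's in-place temp-swap while-loop with a recursive Euclidean gcd helper (objective: simpler).

-- ===== PORT A =====
-- int(char) for a single character: exact on the digit characters '0'-'9', the only
-- characters str(x) produces under Pre_gcdSum (0 ≤ x).
def pyDigitVal (c : Char) : Int := (c.toNat : Int) - 48

-- the while-loop 'while y > 0: temp = x; x = y; y = temp % y' as structural recursion on the state
def euclidLoop (x y : Int) : Int :=
  if h : 0 < y then euclidLoop y (PySem.Int.mod x y) else x
termination_by y.toNat
decreasing_by
  have h1 := PySem.Int.mod_nonneg x h
  have h2 := PySem.Int.mod_lt x h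
  omega

def gcdSum (x : Int) : Int :=
  euclidLoop x ((PySem.Int.toChars x).foldl (fun y c => y + pyDigitVal c) 0)

-- ===== PORT B =====
-- recursive Euclid: 'return a if b == 0 else _gcd(b, a % b)'
def gcdRec (a b : Int) : Int :=
  if h : b = 0 then a else gcdRec b (PySem.Int.mod a b)
termination_by b.natAbs
decreasing_by
  rcases lt_or_gt_of_ne h with hb | hb
  · have := PySem.Int.mod_neg_bounds a hb; omega
  · have h1 := PySem.Int.mod_nonneg a hb
    have h2 := PySem.Int.mod_lt a hb
    omega

def gcdSum_alt (x : Int) : Int :=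
  gcdRec x (((PySem.Int.toChars x).map pyDigitVal).sum)

-- ===== PRECONDITION & SPEC =====
-- Pre_ excludes negative x, on which A raises ValueError (int('-') on the sign character).
def Pre_gcdSum (x : Int) : Prop := 0 ≤ x
instance (x : Int) : Decidable (Pre_gcdSum x) := by unfold Pre_gcdSum; infer_instance
def pvWitness_gcdSum : Int := (12)

def Spec_gcdSum (x : Int) (out : Int) : Prop := out = gcdSum_alt x
instance (x : Int) (out : Int) : Decidable (Spec_gcdSum x out) := by unfold Spec_gcdSum; infer_instance

-- ===== CLAIM (what is proved, stated in full; the proofs are below) =====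
def Claim_equal_gcdSum : Prop := ∀ (x : Int), Dom_gcdSum x → Pre_gcdSum x → Spec_gcdSum x (gcdSum x)

-- ===== LEMMAS AND PROOFS =====

-- A's accumulating for-loop over the digits computes the sum of their values.
theorem foldl_add_eq_map_sum (f : Char → Int) (l : List Char) (a : Int) :
    l.foldl (fun y c => y + f c) a = a + (l.map f).sum := by
  induction l generalizing a with
  | nil => simp
  | cons c t ih => simp [List.foldl, ih, add_assoc]

-- every character emitted by Nat.toDigitsCore with base 10 has code ≥ 48
theorem toDigitsCore_ge (fuel n : Nat) (ds : List Char)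
    (hds : ∀ c ∈ ds, 48 ≤ c.toNat) :
    ∀ c ∈ Nat.toDigitsCore 10 fuel n ds, 48 ≤ c.toNat := by
  induction fuel generalizing n ds with
  | zero => simpa [Nat.toDigitsCore] using hds
  | succ fuel ih =>
    have hd : 48 ≤ ((n % 10).digitChar).toNat := by
      have : n % 10 < 10 := Nat.mod_lt _ (by norm_num)
      interval_cases h : n % 10 <;> decide
    have hds' : ∀ c ∈ (n % 10).digitChar :: ds, 48 ≤ c.toNat := by
      intro c hc
      rcases List.mem_cons.mp hc with rfl | hc
      · exact hd
      · exact hds c hc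
    simp only [Nat.toDigitsCore]
    split
    · intro c hc
      exact hds' c hc
    · exact ih _ _ hds'

theorem digitVal_nonneg_of_toChars {x : Int} (hx : 0 ≤ x) :
    ∀ c ∈ PySem.Int.toChars x, 0 ≤ pyDigitVal c := by
  intro c hc
  have hx' : ¬ x < 0 := by omega
  simp only [PySem.Int.toChars, hx', if_false, Nat.toDigits] at hc
  have := toDigitsCore_ge (x.toNat + 1) x.toNat [] (by simp) c hc
  simp only [pyDigitVal]
  omega

theorem digitSum_nonneg {x : Int} (hx : 0 ≤ x) :
    0 ≤ ((PySem.Int.toChars x).map pyDigitVal).sum := by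
  apply List.sum_nonneg
  intro a ha
  rcases List.mem_map.mp ha with ⟨c, hc, rfl⟩
  exact digitVal_nonneg_of_toChars hx c hc

-- A's while-loop and B's recursion agree whenever the second argument is nonnegative
theorem euclidLoop_eq_gcdRec_aux (n : Nat) : ∀ y : Int, 0 ≤ y → y.toNat ≤ n → ∀ x, euclidLoop x y = gcdRec x y := by
  induction n with
  | zero =>
    intro y hy hn x
    have h0 : y = 0 := by omega
    subst h0
    rw [euclidLoop, gcdRec]
    simp
  | succ n ih =>
    intro y hy _ x
    by_cases h0 : y = 0
    · subst h0
      rw [euclidLoop, gcdRec]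
      simp
    · have hpos : 0 < y := lt_of_le_of_ne hy (Ne.symm h0)
      rw [euclidLoop, gcdRec]
      simp only [hpos, h0, dite_true, dite_false]
      have h1 := PySem.Int.mod_nonneg x hpos
      have h2 := PySem.Int.mod_lt x hpos
      exact ih (PySem.Int.mod x y) h1 (by omega) y

theorem euclidLoop_eq_gcdRec (y : Int) (hy : 0 ≤ y) : ∀ x, euclidLoop x y = gcdRec x y :=
  euclidLoop_eq_gcdRec_aux y.toNat y hy le_rfl

-- ===== VERDICT (by name: the statement is the Claim_ definition above) =====
theorem gcdSum_spec : Claim_equal_gcdSum := by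
  intro x _ hpre
  unfold Spec_gcdSum gcdSum gcdSum_alt
  rw [foldl_add_eq_map_sum, zero_add]
  exact euclidLoop_eq_gcdRec _ (digitSum_nonneg hpre) x
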